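-- pv_equiv track=rewrite | github.com/oleksandr-medviediev/campus_2018_python | Lilia_Panchenko/2/Allergies.py | allergies
-- ===== SOURCE A (Python) =====
-- def two_pow(pow):
-- 	"""
-- 	two_pow(pow)
-- 	This function returns 2 in pow 'pow'
--
--     Args:
--         pow (int): pow to perform
--
--     Returns:
--         int: result of performing pow 'pow' on base 2
--     """
-- 	return 2**pow
--
-- def allergies(score):
-- 	"""
-- 	allergies(score)
-- 	This function returns list of person's allergies
--
--     Args:
--         score (int): cumulated allergy score
--
--     Returns:
--         list: list of allergies
--     """
--
-- 	allergies = {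
-- 	'eggs' : 1,
-- 	'peanuts' : 2,
-- 	'shellfish' : 4,
-- 	'strawberries' : 8,
-- 	'tomatoes' : 16,
-- 	'chocolate' : 32,
-- 	'pollen' : 64,
-- 	'cats' : 128
-- 	}
--
-- 	bin_score_list = []
--
-- 	while score > 0:
--
-- 		bin_score_list.append(score % 2)
-- 		score //= 2
--
-- 	patient_allergies = []
--
-- 	for i in range(len(bin_score_list)):
-- 		two_in_i = two_pow(i)
--
-- 		list_allergies_values = list(allergies.values())
--
-- 		if bin_score_list[i] > 0 and two_in_i in list_allergies_values:
--
-- 			index_to_look_for = list_allergies_values.index(two_in_i)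
-- 			list_allergies_keys = list(allergies.keys())
-- 			patient_allergies.append(list_allergies_keys[index_to_look_for])
--
-- 	return patient_allergies
-- ===== SOURCE B (Python) =====
-- def allergies(score):
--     """Return the list of allergies encoded in the bitmask score."""
--     allergies_table = {
--         'eggs': 1,
--         'peanuts': 2,
--         'shellfish': 4,
--         'strawberries': 8,
--         'tomatoes': 16,
--         'chocolate': 32,
--         'pollen': 64,
--         'cats': 128,
--     }
--     result = []
--     if score > 0:
--         for name, flag in allergies_table.items():
--             if score & flag:
--                 result.append(name)
--     return result
-- ===== Notes on version B (the rewrite author's own statement) =====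
-- stated objective: idiomatic
-- what changed: B replaces A's binary-decomposition loop (build a bit list via %/// then look each power of two up with list.index into the dict's values) by a single guarded scan of the allergy table testing each flag with a bitwise AND.
import Mathlib
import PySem

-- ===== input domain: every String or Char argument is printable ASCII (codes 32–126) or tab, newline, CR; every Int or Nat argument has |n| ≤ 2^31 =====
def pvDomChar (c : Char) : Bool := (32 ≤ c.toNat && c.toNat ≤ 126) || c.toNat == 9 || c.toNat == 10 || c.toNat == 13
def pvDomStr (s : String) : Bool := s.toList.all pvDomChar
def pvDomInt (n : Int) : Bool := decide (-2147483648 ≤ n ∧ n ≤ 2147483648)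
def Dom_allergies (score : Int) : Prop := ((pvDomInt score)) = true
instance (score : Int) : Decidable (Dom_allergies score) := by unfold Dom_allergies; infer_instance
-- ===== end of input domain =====

-- B replaces A's bit-list decomposition + list.index lookups by one guarded scan of the
-- allergy table testing each flag with a bitwise AND (idiomatic; same result on all ints).

-- ===== PORT A =====
-- two_pow(pow) = 2**pow; exact for pow ≥ 0 — the only exponents A passes to it
def two_pow (p : Int) : Int := 2 ^ p.toNat

-- the 'while score > 0' loop accumulating score % 2 digits
def binLoop (score : Int) (acc : List Int) : List Int :=
  if _h : 0 < score then
    binLoop (PySem.Int.floordiv score 2) (acc ++ [PySem.Int.mod score 2])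
  else acc
termination_by score.toNat
decreasing_by
  rw [PySem.Int.floordiv_eq_ediv_of_pos (by norm_num)]
  omega

def allergies (score : Int) : List String :=
  let allergiesD : PySem.Dict String Int := PySem.Dict.mk
    [("eggs", 1), ("peanuts", 2), ("shellfish", 4), ("strawberries", 8),
     ("tomatoes", 16), ("chocolate", 32), ("pollen", 64), ("cats", 128)]
  let bin_score_list := binLoop score []
  (PySem.List.pyRange 0 (bin_score_list.length : Int) 1).foldl (fun patient i =>
    let two_in_i := two_pow i
    let list_allergies_values := allergiesD.values
    if PySem.List.pyGetD bin_score_list i 0 > 0 ∧ two_in_i ∈ list_allergies_values then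
      -- list.index(two_in_i) is guaranteed some by the membership guard; the .getD 0 default is never used
      patient ++ [PySem.List.pyGetD allergiesD.keys
        (((PySem.List.index? list_allergies_values two_in_i).getD 0 : Nat) : Int) ""]
    else patient) []

-- ===== PORT B =====
def allergies_alt (score : Int) : List String :=
  let table : PySem.Dict String Int := PySem.Dict.mk
    [("eggs", 1), ("peanuts", 2), ("shellfish", 4), ("strawberries", 8),
     ("tomatoes", 16), ("chocolate", 32), ("pollen", 64), ("cats", 128)]
  let result : List String := []
  if 0 < score then
    -- 'if score & flag:' — Python truthiness of an int is ≠ 0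
    table.items.foldl (fun result p =>
      if PySem.Int.band score p.2 ≠ 0 then result ++ [p.1] else result) result
  else result

-- ===== PRECONDITION & SPEC =====
def Spec_allergies (score : Int) (out : List String) : Prop := out = allergies_alt score
instance (score : Int) (out : List String) : Decidable (Spec_allergies score out) := by unfold Spec_allergies; infer_instance

-- ===== CLAIM (what is proved, stated in full; the proofs are below) =====
def Claim_equal_allergies : Prop := ∀ (score : Int), Dom_allergies score → Spec_allergies score (allergies score)

-- ===== LEMMAS AND PROOFS =====

-- proof-side mirror of binLoop on naturals
def natBits : Nat → List Int
  | 0 => []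
  | n+1 => (((n+1) % 2 : Nat) : Int) :: natBits ((n+1)/2)

-- the 8 allergy names, for the common normal form of both ports
def pvNames : List String :=
  ["eggs", "peanuts", "shellfish", "strawberries", "tomatoes", "chocolate", "pollen", "cats"]

lemma binLoop_eq (n : Nat) : ∀ acc, binLoop (n : Int) acc = acc ++ natBits n := by
  induction n using Nat.strong_induction_on with
  | _ n ih =>
    intro acc
    match n with
    | 0 => unfold binLoop natBits; simp
    | m+1 =>
      unfold binLoop
      rw [dif_pos (by positivity)]
      rw [PySem.Int.floordiv_eq_ediv_of_pos (by norm_num), PySem.Int.mod_eq_emod_of_pos (by norm_num)]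
      rw [show ((m+1 : Nat) : Int) / 2 = (((m+1)/2 : Nat) : Int) by omega]
      rw [ih ((m+1)/2) (by omega)]
      conv_rhs => rw [natBits]
      have : ((m+1 : Nat) : Int) % 2 = (((m+1) % 2 : Nat) : Int) := by omega
      rw [this]
      simp

lemma natBits_getD (n : Nat) : ∀ i, (natBits n).getD i 0 = if n.testBit i then 1 else 0 := by
  induction n using Nat.strong_induction_on with
  | _ n ih =>
    intro i
    match n with
    | 0 => simp [natBits]
    | m+1 =>
      unfold natBits
      match i with
      | 0 => simp [Nat.testBit_zero]; omega
      | j+1 =>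
        simp only [List.getD_cons_succ]
        rw [ih ((m+1)/2) (by omega) j, Nat.testBit_add_one]

lemma natBits_lt (n : Nat) : n < 2 ^ (natBits n).length := by
  induction n using Nat.strong_induction_on with
  | _ n ih =>
    match n with
    | 0 => simp [natBits]
    | m+1 =>
      unfold natBits
      have := ih ((m+1)/2) (by omega)
      simp only [List.length_cons]
      rw [pow_succ]
      omega

lemma filter_range_eq (a b : Nat) (p q : Nat → Bool)
    (h : ∀ i, (decide (i < a) && p i) = (decide (i < b) && q i)) :
    (List.range a).filter p = (List.range b).filter q := by
  have key : ∀ (c d : Nat) (r : Nat → Bool), c ≤ d →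
      (List.range c).filter r = (List.range d).filter (fun i => decide (i < c) && r i) := by
    intro c d r hcd
    rw [show d = c + (d - c) by omega, List.range_add, List.filter_append]
    have h2 : (List.map (c + ·) (List.range (d - c))).filter (fun i => decide (i < c) && r i) = [] := by
      rw [List.filter_eq_nil_iff]
      intro x hx
      simp only [List.mem_map] at hx
      obtain ⟨y, _, rfl⟩ := hx
      simp
    rw [h2, List.append_nil]
    apply List.filter_congr
    intro x hx
    simp only [List.mem_range] at hx
    simp [hx]
  rw [key a (max a b) p (le_max_left a b), key b (max a b) q (le_max_right a b)]
  apply List.filter_congr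
  intro x _
  exact h x

lemma mem_vals (i : Nat) : (2:Int)^i ∈ [(1:Int),2,4,8,16,32,64,128] ↔ i < 8 := by
  constructor
  · intro h
    by_contra hi
    push_neg at hi
    have h256 : (256:Int) ≤ 2^i := by
      calc (256:Int) = 2^8 := by norm_num
      _ ≤ 2^i := by apply pow_le_pow_right₀ (by norm_num) hi
    simp only [List.mem_cons, List.not_mem_nil, or_false] at h
    omega
  · intro h
    interval_cases i <;> decide

lemma testBit_lt_len (n i : Nat) (h : n.testBit i = true) : i < (natBits n).length := by
  by_contra hi
  push_neg at hi
  rw [Nat.testBit_lt_two_pow (lt_of_lt_of_le (natBits_lt n) (Nat.pow_le_pow_right (by norm_num) hi))] at h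
  exact absurd h (by simp)

lemma band_two_pow (n k : Nat) : (PySem.Int.band (n : Int) ((2:Int)^k) ≠ 0) ↔ n.testBit k = true := by
  have : ((2:Int)^k) = (((2^k : Nat) : Int)) := by push_cast; ring
  rw [this, PySem.Int.band_natCast, Nat.and_two_pow]
  rcases h : n.testBit k <;> simp

lemma allergies_eq_core (n : Nat) (hn : 0 < n) :
    allergies (n : Int) = ((List.range 8).filter (n.testBit ·)).map (fun k => pvNames.getD k "") := by
  unfold allergies
  simp only [binLoop_eq n [], List.nil_append, PySem.Dict.values_mk, PySem.Dict.keys_mk,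
    List.map_cons, List.map_nil]
  rw [PySem.List.pyRange_zero_nat, List.foldl_map]
  rw [PySem.List.foldl_append_ite
    (fun k : Nat => PySem.List.pyGetD (natBits n) (k : Int) 0 > 0 ∧
      two_pow (k : Int) ∈ [(1:Int),2,4,8,16,32,64,128])
    (fun k : Nat => PySem.List.pyGetD ["eggs","peanuts","shellfish","strawberries","tomatoes","chocolate","pollen","cats"]
      (((PySem.List.index? [(1:Int),2,4,8,16,32,64,128] (two_pow (k : Int))).getD 0 : Nat) : Int) "")
    (List.range (natBits n).length) []]
  rw [List.nil_append]
  rw [filter_range_eq (natBits n).length 8 _ (n.testBit ·) ?_]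
  · apply List.map_congr_left
    intro k hk
    obtain ⟨hk1, -⟩ := List.mem_filter.mp hk
    rw [List.mem_range] at hk1
    interval_cases k <;> decide
  · intro i
    simp only [PySem.List.pyGetD_natCast, natBits_getD n i]
    have h2 : two_pow (i : Int) = (2:Int)^i := by simp [two_pow]
    rcases h : n.testBit i with _ | _
    · simp [h]
    · have hl := testBit_lt_len n i h
      simp [h, hl, h2, mem_vals i]

lemma allergies_alt_eq_core (n : Nat) (hn : 0 < n) :
    allergies_alt (n : Int) = ((List.range 8).filter (n.testBit ·)).map (fun k => pvNames.getD k "") := by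
  unfold allergies_alt
  rw [if_pos (by exact_mod_cast hn)]
  have hitems : (PySem.Dict.mk
      [("eggs", (1:Int)), ("peanuts", 2), ("shellfish", 4), ("strawberries", 8),
       ("tomatoes", 16), ("chocolate", 32), ("pollen", 64), ("cats", 128)]).items
      = (List.range 8).map (fun k => (pvNames.getD k "", ((2:Int)^k))) := by decide
  rw [hitems, List.foldl_map]
  rw [PySem.List.foldl_append_ite
    (fun k : Nat => PySem.Int.band (n : Int) ((2:Int)^k) ≠ 0)
    (fun k : Nat => pvNames.getD k "")]
  rw [List.nil_append]
  congr 1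
  apply List.filter_congr
  intro k _
  simp [band_two_pow n k]

-- ===== VERDICT (by name: the statement is the Claim_ definition above) =====
theorem allergies_spec : Claim_equal_allergies := by
  intro score _
  unfold Spec_allergies
  by_cases h : 0 < score
  · obtain ⟨n, rfl⟩ : ∃ n : Nat, score = (n : Int) := ⟨score.toNat, by omega⟩
    rw [allergies_eq_core n (by omega), allergies_alt_eq_core n (by omega)]
  · have h1 : allergies score = [] := by
      unfold allergies
      rw [show binLoop score [] = [] from by unfold binLoop; simp [h]]
      simp [PySem.List.pyRange_one_eq_nil]
    have h2 : allergies_alt score = [] := by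
      unfold allergies_alt; simp [h]
    rw [h1, h2]
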